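-- pv_equiv track=rewrite | github.com/MrBrantCode/unitest_baseline | mut_generate/mist_train_taco/taco_13192/solution.py | calculate_last_two_digits
-- ===== SOURCE A (Python) =====
-- def calculate_last_two_digits(T, test_cases):
--     results = []
--     for k, n in test_cases:
--         k += 1
--         full = sum((pow(i, n, 100) for i in range(100))) % 100
--         tail = sum((pow(i, n, 100) for i in range(k % 100))) % 100
--         ans = (full * (k // 100) + tail) % 100
--         results.append('{:02d}'.format(ans))
--     return results
-- ===== SOURCE B (Python) =====
-- def calculate_last_two_digits(T, test_cases):
--     results = []
--     for k, n in test_cases: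
--         k += 1
--         P = [0]
--         for j in range(1, 101):
--             P.append((P[-1] + pow(j - 1, n, 100)) % 100)
--         ans = (P[100] * (k // 100) + P[k % 100]) % 100
--         results.append('{:02d}'.format(ans))
--     return results
-- ===== Notes on version B (the rewrite author's own statement) =====
-- stated objective: alternative
-- what changed: Replaces the two independent generator-sum scans (full period and tail) by a single cumulative prefix table P of running sums of pow(i, n, 100) mod 100, indexed at 100 and at k % 100.
import Mathlib
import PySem

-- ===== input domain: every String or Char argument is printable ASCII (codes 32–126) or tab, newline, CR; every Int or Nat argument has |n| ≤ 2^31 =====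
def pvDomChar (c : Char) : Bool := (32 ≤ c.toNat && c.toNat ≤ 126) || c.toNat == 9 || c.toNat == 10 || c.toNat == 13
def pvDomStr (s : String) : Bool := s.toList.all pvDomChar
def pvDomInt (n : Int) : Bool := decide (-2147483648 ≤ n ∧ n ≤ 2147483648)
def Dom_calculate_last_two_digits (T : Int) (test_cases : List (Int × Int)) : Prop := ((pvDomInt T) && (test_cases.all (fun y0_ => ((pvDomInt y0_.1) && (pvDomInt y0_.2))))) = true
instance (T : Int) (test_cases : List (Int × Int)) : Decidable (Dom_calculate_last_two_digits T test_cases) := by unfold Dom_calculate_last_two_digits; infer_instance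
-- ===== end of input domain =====

-- B replaces A's two independent generator-sum scans per case by one cumulative prefix table
-- of running sums mod 100, indexed twice (objective: alternative, same asymptotics).

-- pow(b, e, 100): square-and-multiply modular power, exact for e ≥ 0 (Pre_) and positive modulus
-- (how both ports use it); pvPowMod computes the same values but linearly in e.
def pvPowMod (b : Int) (e : Nat) (m : Int) : Int :=
  if h : e = 0 then PySem.Int.mod 1 m
  else
    let r := pvPowMod b (e / 2) m
    if e % 2 = 0 then PySem.Int.mod (r * r) m
    else PySem.Int.mod (r * r * b) m
decreasing_by exact Nat.div_lt_self (Nat.pos_of_ne_zero h) one_lt_two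

-- '{:02d}'.format(a): exact for 0 ≤ a < 100, which holds for every value it is applied to
-- (ans is always a Python '% 100' result, hence in [0, 100)).
def pvFmt2 (a : Int) : String := if a < 10 then "0" ++ PySem.Int.toStr a else PySem.Int.toStr a

-- ===== PORT A =====
-- pow(i, n, 100) is pvPowMod i n.toNat 100 — exact for n ≥ 0 (Pre_; Python raises for n < 0).
def calculate_last_two_digits (T : Int) (test_cases : List (Int × Int)) : List String :=
  test_cases.foldl (fun results c =>
    let k := c.1 + 1
    let n := c.2
    let full := PySem.Int.mod (((PySem.List.pyRange 0 100 1).map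
      (fun i => pvPowMod i n.toNat 100)).sum) 100
    let tail := PySem.Int.mod (((PySem.List.pyRange 0 (PySem.Int.mod k 100) 1).map
      (fun i => pvPowMod i n.toNat 100)).sum) 100
    let ans := PySem.Int.mod (full * PySem.Int.floordiv k 100 + tail) 100
    results ++ [pvFmt2 ans]) []

-- ===== PORT B =====
-- P[-1] and P[k % 100] / P[100]: the indices are always in range (len P grows 1..101, k % 100 ∈ [0,100)),
-- so Python's P[·] is pyGetD with any default.
def calculate_last_two_digits_alt (T : Int) (test_cases : List (Int × Int)) : List String :=
  test_cases.foldl (fun results c =>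
    let k := c.1 + 1
    let n := c.2
    let P := (PySem.List.pyRange 1 101 1).foldl
      (fun P j => P ++ [PySem.Int.mod (PySem.List.pyGetD P (-1) 0 + pvPowMod (j - 1) n.toNat 100) 100]) [0]
    let ans := PySem.Int.mod (PySem.List.pyGetD P 100 0 * PySem.Int.floordiv k 100
      + PySem.List.pyGetD P (PySem.Int.mod k 100) 0) 100
    results ++ [pvFmt2 ans]) []

-- ===== PRECONDITION & SPEC =====
-- Python's pow(i, n, 100) raises ValueError for n < 0 (base 0 occurs in every scan and has no
-- inverse mod 100), in A and in B alike; Pre_ excludes exactly those inputs.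
def Pre_calculate_last_two_digits (T : Int) (test_cases : List (Int × Int)) : Prop :=
  ∀ c ∈ test_cases, 0 ≤ c.2
instance (T : Int) (test_cases : List (Int × Int)) : Decidable (Pre_calculate_last_two_digits T test_cases) := by unfold Pre_calculate_last_two_digits; infer_instance
def pvWitness_calculate_last_two_digits : Int × (List (Int × Int)) := (2, [(5, 2), (123, 7)])
def Spec_calculate_last_two_digits (T : Int) (test_cases : List (Int × Int)) (out : List String) : Prop := out = calculate_last_two_digits_alt T test_cases
instance (T : Int) (test_cases : List (Int × Int)) (out : List String) : Decidable (Spec_calculate_last_two_digits T test_cases out) := by unfold Spec_calculate_last_two_digits; infer_instance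

-- ===== CLAIM (what is proved, stated in full; the proofs are below) =====
def Claim_equal_calculate_last_two_digits : Prop := ∀ (T : Int) (test_cases : List (Int × Int)), Dom_calculate_last_two_digits T test_cases → Pre_calculate_last_two_digits T test_cases → Spec_calculate_last_two_digits T test_cases (calculate_last_two_digits T test_cases)

-- ===== LEMMAS AND PROOFS =====

-- the prefix sums A computes
def pvS (n : Int) (m : Nat) : Int := ((List.range m).map (fun i : Nat => pvPowMod (i : Int) n.toNat 100)).sum

-- B's inner loop after m steps is the table of prefix sums mod 100
lemma pvBuild (n : Int) (m : Nat) :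
    (PySem.List.pyRange 1 (1 + (m : Int)) 1).foldl
      (fun P j => P ++ [PySem.Int.mod (PySem.List.pyGetD P (-1) 0 + pvPowMod (j - 1) n.toNat 100) 100]) [0]
    = (List.range (m + 1)).map (fun j => PySem.Int.mod (pvS n j) 100) := by
  induction m with
  | zero =>
    have h0 : (1 + ((0 : Nat) : Int)) = 1 := by norm_num
    rw [h0, PySem.List.pyRange_one_eq_nil le_rfl]
    simp [pvS]
  | succ m ih =>
    have hsplit : PySem.List.pyRange 1 (1 + ((m + 1 : Nat) : Int)) 1
        = PySem.List.pyRange 1 (1 + (m : Int)) 1 ++ [1 + (m : Int)] := by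
      have h2 : (1 + ((m + 1 : Nat) : Int)) = (1 + (m : Int)) + 1 := by push_cast; ring
      rw [h2, PySem.List.pyRange_one_succ_right (by omega)]
    rw [hsplit, List.foldl_append, ih]
    simp only [List.foldl_cons, List.foldl_nil]
    have hlast : PySem.List.pyGetD
        ((List.range (m + 1)).map (fun j => PySem.Int.mod (pvS n j) 100)) (-1) 0
        = PySem.Int.mod (pvS n m) 100 := by
      rw [List.range_succ, List.map_append]
      exact PySem.List.pyGetD_neg_one_append_singleton _ _ _
    rw [hlast,
        show List.range (m + 1 + 1) = List.range (m + 1) ++ [m + 1] from List.range_succ,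
        List.map_append]
    congr 1
    simp only [List.map_cons, List.map_nil]
    congr 1
    have h1 : (1 + (m : Int) - 1) = (m : Int) := by ring
    rw [h1]
    have hS : pvS n (m + 1) = pvS n m + pvPowMod (m : Int) n.toNat 100 := by
      simp [pvS, List.range_succ]
    rw [hS]
    simp only [PySem.Int.mod_eq_emod_of_pos (show (0:Int) < 100 by norm_num)]
    rw [Int.emod_add_emod]

-- the two per-case answers coincide
lemma pvAns (k n : Int) :
    PySem.Int.mod
      (PySem.Int.mod (((PySem.List.pyRange 0 100 1).map
          (fun i => pvPowMod i n.toNat 100)).sum) 100 * PySem.Int.floordiv k 100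
        + PySem.Int.mod (((PySem.List.pyRange 0 (PySem.Int.mod k 100) 1).map
          (fun i => pvPowMod i n.toNat 100)).sum) 100) 100
    = PySem.Int.mod
        (PySem.List.pyGetD ((PySem.List.pyRange 1 101 1).foldl
            (fun P j => P ++ [PySem.Int.mod (PySem.List.pyGetD P (-1) 0 + pvPowMod (j - 1) n.toNat 100) 100]) [0]) 100 0
          * PySem.Int.floordiv k 100
          + PySem.List.pyGetD ((PySem.List.pyRange 1 101 1).foldl
              (fun P j => P ++ [PySem.Int.mod (PySem.List.pyGetD P (-1) 0 + pvPowMod (j - 1) n.toNat 100) 100]) [0])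
            (PySem.Int.mod k 100) 0) 100 := by
  have hP := pvBuild n 100
  have h101 : (1 : Int) + ((100 : Nat) : Int) = 101 := by norm_num
  rw [h101] at hP
  rw [hP]
  have hm0 : 0 ≤ PySem.Int.mod k 100 := PySem.Int.mod_nonneg k (by norm_num)
  have hmlt : PySem.Int.mod k 100 < 100 := PySem.Int.mod_lt k (by norm_num)
  rw [PySem.List.pyGetD_ofNat',
      PySem.List.getD_map_range _ _ _ _ (by norm_num),
      PySem.List.pyGetD_eq_getElem _ 0 hm0 (by simp; omega)]
  simp only [List.getElem_map, List.getElem_range]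
  have hfull : ((PySem.List.pyRange 0 100 1).map
      (fun i => pvPowMod i n.toNat 100)).sum = pvS n 100 := by
    have h := PySem.List.pyRange_zero_natCast 100
    norm_num at h
    rw [h, List.map_map]
    simp only [pvS, Function.comp_def]
  have htail : ((PySem.List.pyRange 0 (PySem.Int.mod k 100) 1).map
      (fun i => pvPowMod i n.toNat 100)).sum = pvS n (PySem.Int.mod k 100).toNat := by
    have h := PySem.List.pyRange_zero_natCast (PySem.Int.mod k 100).toNat
    rw [Int.toNat_of_nonneg hm0] at h
    rw [h, List.map_map]
    simp only [pvS, Function.comp_def]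
  rw [hfull, htail]

set_option maxRecDepth 8192 in
set_option maxHeartbeats 1000000 in
lemma pvFold (tcs : List (Int × Int)) (acc : List String) :
    tcs.foldl (fun results c =>
      let k := c.1 + 1
      let n := c.2
      let full := PySem.Int.mod (((PySem.List.pyRange 0 100 1).map
        (fun i => pvPowMod i n.toNat 100)).sum) 100
      let tail := PySem.Int.mod (((PySem.List.pyRange 0 (PySem.Int.mod k 100) 1).map
        (fun i => pvPowMod i n.toNat 100)).sum) 100
      let ans := PySem.Int.mod (full * PySem.Int.floordiv k 100 + tail) 100
      results ++ [pvFmt2 ans]) acc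
    = tcs.foldl (fun results c =>
      let k := c.1 + 1
      let n := c.2
      let P := (PySem.List.pyRange 1 101 1).foldl
        (fun P j => P ++ [PySem.Int.mod (PySem.List.pyGetD P (-1) 0 + pvPowMod (j - 1) n.toNat 100) 100]) [0]
      let ans := PySem.Int.mod (PySem.List.pyGetD P 100 0 * PySem.Int.floordiv k 100
        + PySem.List.pyGetD P (PySem.Int.mod k 100) 0) 100
      results ++ [pvFmt2 ans]) acc := by
  induction tcs generalizing acc with
  | nil => simp only [List.foldl_nil]
  | cons c rest ih =>
    simp only [List.foldl_cons]
    rw [pvAns (c.1 + 1) c.2]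
    exact ih _

-- ===== VERDICT (by name: the statement is the Claim_ definition above) =====
theorem calculate_last_two_digits_spec : Claim_equal_calculate_last_two_digits := by
  intro T tcs _ _
  show calculate_last_two_digits T tcs = calculate_last_two_digits_alt T tcs
  exact pvFold tcs []
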